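-- pv_equiv track=rewrite | github.com/nghiatt90/cs-practice | codelearn/isthuemorse.py | isThueMorse
-- ===== SOURCE A (Python) =====
-- def isThueMorse(seq):
--     x = [0]
--     while True:
--         for i in range(len(x)):
--             if i < len(seq) and x[i] != seq[i]:
--                 return False
--             if i == len(seq):
--                 return True
--             x.append(1-x[i])
-- ===== SOURCE B (Python) =====
-- def isThueMorse(seq):
--     for i, v in enumerate(seq):
--         if bin(i).count('1') % 2 != v:
--             return False
--     return True
-- ===== Notes on version B (the rewrite author's own statement) =====
-- stated objective: simpler
-- what changed: B replaces A's repeated doubling construction of a growing Thue-Morse prefix list (rebuilt and rescanned from index 0 on every while-pass) by a single pass over seq that computes each i-th Thue-Morse bit in closed form as the parity of the popcount of i (bin(i).count('1') % 2).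
import Mathlib
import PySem

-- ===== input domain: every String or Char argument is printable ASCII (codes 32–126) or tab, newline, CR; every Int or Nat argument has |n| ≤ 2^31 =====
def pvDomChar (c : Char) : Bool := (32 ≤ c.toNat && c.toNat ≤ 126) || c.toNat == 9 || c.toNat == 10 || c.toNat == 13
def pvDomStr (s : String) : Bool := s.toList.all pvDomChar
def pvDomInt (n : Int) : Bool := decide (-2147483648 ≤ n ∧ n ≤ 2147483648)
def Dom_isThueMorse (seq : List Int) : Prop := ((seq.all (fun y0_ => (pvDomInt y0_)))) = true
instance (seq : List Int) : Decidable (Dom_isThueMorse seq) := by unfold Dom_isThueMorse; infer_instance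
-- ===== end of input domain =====

-- B computes the i-th Thue-Morse bit in closed form (parity of popcount i) instead of
-- A's repeated doubling construction of the whole prefix; objective: simpler/idiomatic.

-- ===== PORT A =====
-- A's `for i in range(len(x))` body: checks seq against x and appends 1-x[i] as it goes.
-- x[i] with 0 ≤ i < len(x) always in range in A, so `getD` is an exact totalizing guard.
def innerA (seq x : List Int) (i n : Nat) : Bool ⊕ List Int :=
  if _h : i < n then
    if i < seq.length ∧ x.getD i 0 ≠ seq.getD i 0 then .inl false
    else if i = seq.length then .inl true
    else innerA seq (x ++ [1 - x.getD i 0]) (i + 1) n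
  else .inr x
termination_by n - i

-- A's `while True`; the fuel only totalizes the loop (proved sufficient below: x doubles
-- each pass and the loop returns once len(x) > len(seq)).
def outerA (seq : List Int) : Nat → List Int → Bool
  | 0, _ => false
  | fuel + 1, x =>
    match innerA seq x 0 x.length with
    | .inl b => b
    | .inr x' => outerA seq fuel x'

def isThueMorse (seq : List Int) : Bool := outerA seq (seq.length + 2) [0]

-- ===== PORT B =====
-- port of Python's bin(i).count('1'): number of 1 bits of i
def pcount (n : Nat) : Nat :=
  if h : n = 0 then 0 else n % 2 + pcount (n / 2)
termination_by n
decreasing_by exact Nat.div_lt_self (Nat.pos_of_ne_zero h) one_lt_two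

-- B's `for i, v in enumerate(seq)` loop with early return
def altGo : List Int → Nat → Bool
  | [], _ => true
  | v :: rest, i => if (↑(pcount i % 2) : Int) ≠ v then false else altGo rest (i + 1)

def isThueMorse_alt (seq : List Int) : Bool := altGo seq 0

-- ===== PRECONDITION & SPEC =====
def Spec_isThueMorse (seq : List Int) (out : Bool) : Prop := out = isThueMorse_alt seq
instance (seq : List Int) (out : Bool) : Decidable (Spec_isThueMorse seq out) := by unfold Spec_isThueMorse; infer_instance

-- ===== CLAIM (what is proved, stated in full; the proofs are below) =====
def Claim_equal_isThueMorse : Prop := ∀ (seq : List Int), Dom_isThueMorse seq → Spec_isThueMorse seq (isThueMorse seq)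

-- ===== LEMMAS AND PROOFS =====

-- the i-th Thue-Morse bit, as an Int
def tmB (i : Nat) : Int := ((pcount i % 2 : Nat) : Int)

lemma pcount_step (j : Nat) : pcount j = j % 2 + pcount (j / 2) := by
  by_cases h : j = 0
  · subst h; simp [pcount]
  · rw [pcount, dif_neg h]

lemma pcount_pow_add : ∀ k j, j < 2 ^ k → pcount (2 ^ k + j) = pcount j + 1 := by
  intro k
  induction k with
  | zero =>
    intro j hj
    interval_cases j
    simp [pcount]
  | succ k ih =>
    intro j hj
    have h2 : (2 ^ (k + 1) + j) / 2 = 2 ^ k + j / 2 := by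
      rw [pow_succ]; omega
    have h3 : (2 ^ (k + 1) + j) % 2 = j % 2 := by
      rw [pow_succ]; omega
    rw [pcount_step (2 ^ (k + 1) + j), h2, h3, ih (j / 2) (by rw [pow_succ] at hj; omega),
      pcount_step j]
    omega

lemma tmB_flip {k j : Nat} (hj : j < 2 ^ k) : tmB (2 ^ k + j) = 1 - tmB j := by
  unfold tmB
  rw [pcount_pow_add k j hj]
  rcases Nat.mod_two_eq_zero_or_one (pcount j) with h | h <;> rw [Nat.add_mod, h] <;> decide

lemma altGo_iff : ∀ (l : List Int) (i : Nat),
    (altGo l i = true ↔ ∀ j < l.length, l.getD j 0 = tmB (i + j)) := by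
  intro l
  induction l with
  | nil => intro i; simp [altGo]
  | cons v rest ih =>
    intro i
    unfold altGo
    by_cases hv : (↑(pcount i % 2) : Int) ≠ v
    · simp only [if_pos hv, Bool.false_eq_true, false_iff]
      intro h
      have h0 := h 0 (by simp)
      simp only [List.getD_cons_zero] at h0
      exact hv (by rw [h0]; simp [tmB])
    · rw [if_neg hv, ih (i + 1)]
      push Not at hv
      constructor
      · intro h j hj
        cases j with
        | zero => simpa [tmB] using hv.symm
        | succ j =>
          have he : i + (j + 1) = (i + 1) + j := by omega
          rw [List.getD_cons_succ, he]
          exact h j (by simpa using Nat.lt_of_succ_lt_succ hj)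
      · intro h j hj
        have he : (i + 1) + j = i + (j + 1) := by omega
        rw [he, ← List.getD_cons_succ (x := v)]
        exact h (j + 1) (by simpa using Nat.succ_lt_succ hj)

lemma innerA_go (seq x₀ : List Int) (n : Nat) (hn : x₀.length = n) :
    ∀ m i, i ≤ n → n - i = m →
    innerA seq (x₀ ++ (x₀.take i).map (fun b => 1 - b)) i n =
      (if ∃ j < n, i ≤ j ∧ j < seq.length ∧ x₀.getD j 0 ≠ seq.getD j 0 then .inl false
       else if seq.length < n ∧ i ≤ seq.length then .inl true
       else .inr (x₀ ++ x₀.map (fun b => 1 - b))) := by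
  intro m
  induction m with
  | zero =>
    intro i hi hm
    have hin : i = n := by omega
    subst hin
    rw [innerA, List.take_of_length_le (by omega)]
    rw [dif_neg (lt_irrefl i)]
    rw [if_neg (by rintro ⟨j, hj, hij, -, -⟩; omega),
      if_neg (by rintro ⟨h1, h2⟩; omega)]
  | succ m ih =>
    intro i hi hm
    have hilt : i < n := by omega
    have hix : i < x₀.length := by omega
    rw [innerA]
    rw [dif_pos hilt]
    have hget : (x₀ ++ (x₀.take i).map (fun b => 1 - b)).getD i 0 = x₀.getD i 0 :=
      List.getD_append _ _ _ _ hix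
    rw [hget]
    by_cases hmis : i < seq.length ∧ x₀.getD i 0 ≠ seq.getD i 0
    · rw [if_pos hmis, if_pos ⟨i, hilt, le_refl i, hmis⟩]
    · rw [if_neg hmis]
      by_cases hL : i = seq.length
      · rw [if_pos hL, if_neg (by rintro ⟨j, hj, hij, hjL, -⟩; omega),
          if_pos ⟨by omega, by omega⟩]
      · rw [if_neg hL]
        have hext : (x₀ ++ (x₀.take i).map (fun b => 1 - b)) ++ [1 - x₀.getD i 0]
            = x₀ ++ (x₀.take (i + 1)).map (fun b => 1 - b) := by
          have ht : x₀.take (i + 1) = x₀.take i ++ [x₀[i]] := by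
            rw [List.take_add_one, List.getElem?_eq_getElem hix]
            rfl
          rw [ht, List.map_append, ← List.append_assoc]
          simp [List.getD, List.getElem?_eq_getElem hix]
        rw [hext, ih (i + 1) (by omega) (by omega)]
        have hc1 : (∃ j < n, i + 1 ≤ j ∧ j < seq.length ∧ x₀.getD j 0 ≠ seq.getD j 0)
            ↔ (∃ j < n, i ≤ j ∧ j < seq.length ∧ x₀.getD j 0 ≠ seq.getD j 0) := by
          constructor
          · rintro ⟨j, h1, h2, h3⟩; exact ⟨j, h1, by omega, h3⟩
          · rintro ⟨j, h1, h2, h3, h4⟩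
            refine ⟨j, h1, ?_, h3, h4⟩
            rcases Nat.eq_or_lt_of_le h2 with h | h
            · exact absurd ⟨h ▸ h3, h ▸ h4⟩ hmis
            · omega
        have hc2 : (seq.length < n ∧ i + 1 ≤ seq.length)
            ↔ (seq.length < n ∧ i ≤ seq.length) := by
          constructor <;> rintro ⟨h1, h2⟩ <;> exact ⟨h1, by omega⟩
        simp only [hc1, hc2]

lemma outerA_iff (seq : List Int) :
    ∀ fuel k (x : List Int), x.length = 2 ^ k →
    (∀ j, j < 2 ^ k → x.getD j 0 = tmB j) →
    0 < fuel → seq.length + 2 ≤ fuel + 2 ^ k →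
    (outerA seq fuel x = true ↔ ∀ j < seq.length, seq.getD j 0 = tmB j) := by
  intro fuel
  induction fuel with
  | zero => intro k x _ _ h0 _; omega
  | succ f ih =>
    intro k x hlen hinv _ hfuel
    have hpow : 0 < 2 ^ k := Nat.two_pow_pos k
    have hkey := innerA_go seq x x.length rfl x.length 0 (Nat.zero_le _) (by omega)
    simp only [List.take_zero, List.map_nil, List.append_nil] at hkey
    rcases hres : innerA seq x 0 x.length with b | x'
    · have hres2 := hres
      rw [hkey] at hres2
      simp only [outerA, hres]
      split_ifs at hres2 with hmis hdone
      · have hb : b = false := by simpa using hres2.symm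
        subst hb
        simp only [Bool.false_eq_true, false_iff]
        intro hall
        obtain ⟨j, hj, -, hjL, hne⟩ := hmis
        exact hne (by rw [hall j hjL, hinv j (by omega)])
      · have hb : b = true := by simpa using hres2.symm
        subst hb
        simp only [true_iff]
        intro j hjL
        push Not at hmis
        have hj : j < x.length := by omega
        have h5 := hmis j hj (Nat.zero_le _) hjL
        rw [← h5]
        exact hinv j (by omega)
    · have hres2 := hres
      rw [hkey] at hres2
      simp only [outerA, hres]
      split_ifs at hres2 with hmis hdone
      have hx' : x ++ x.map (fun b => 1 - b) = x' := by injection hres2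
      subst hx'
      have hkL : 2 ^ k ≤ seq.length := by
        by_contra h
        exact hdone ⟨by omega, Nat.zero_le _⟩
      have h2k1 : 2 ^ (k + 1) = 2 * 2 ^ k := by rw [pow_succ]; ring
      have hlen' : (x ++ x.map (fun b => 1 - b)).length = 2 ^ (k + 1) := by
        simp [hlen, h2k1]; ring
      have hinv' : ∀ j, j < 2 ^ (k + 1) → (x ++ x.map (fun b => 1 - b)).getD j 0 = tmB j := by
        intro j hj
        by_cases hjk : j < 2 ^ k
        · rw [List.getD_append _ _ _ _ (by omega), hinv j hjk]
        · have hj' : j - 2 ^ k < 2 ^ k := by omega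
          have hsplit : j = 2 ^ k + (j - 2 ^ k) := by omega
          have hmaplen : j - 2 ^ k < (x.map (fun b => 1 - b)).length := by
            simpa [hlen] using hj'
          rw [List.getD_append_right _ _ _ _ (by omega), hlen,
            List.getD_eq_getElem _ 0 hmaplen, List.getElem_map,
            ← List.getD_eq_getElem x 0 (by omega : j - 2 ^ k < x.length),
            hinv _ hj']
          conv_rhs => rw [hsplit]
          rw [tmB_flip hj']
      exact ih (k + 1) _ hlen' hinv' (by omega) (by omega)

-- ===== VERDICT (by name: the statement is the Claim_ definition above) =====
theorem isThueMorse_spec : Claim_equal_isThueMorse := by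
  intro seq _
  unfold Spec_isThueMorse isThueMorse isThueMorse_alt
  have hA := outerA_iff seq (seq.length + 2) 0 [0] (by simp)
    (by intro j hj; interval_cases j; simp [tmB, pcount]) (by omega) (by omega)
  have hB := altGo_iff seq 0
  simp only [Nat.zero_add] at hB
  rw [Bool.eq_iff_iff, hA, hB]
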